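-- pv_equiv track=rewrite | github.com/Dslpss/dbdouble | services/pattern_signals.py | detectar_padrao5
-- ===== SOURCE A (Python) =====
-- from typing import List, Optional, Dict, Tuple
--
-- def detectar_padrao5(historico: List[str]) -> Tuple[bool, Optional[str], Optional[str]]:
--     # Branco como reset de tendência: tendência >=3 antes do B
--     if len(historico) < 4:
--         return False, None, None
--     if historico[-1] == "B":
--         # conta corrida da cor imediatamente antes do B
--         if historico[-2] not in ("V", "P"):
--             return False, None, None
--         run_color = historico[-2]
--         run = 1
--         for i in range(len(historico) - 2, -1, -1):
--             if historico[i] == run_color: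
--                 run += 1
--             else:
--                 break
--         if run >= 3:
--             suggested = "P" if run_color == "V" else "V"
--             return True, suggested, "baixo-medio"
--     return False, None, None
-- ===== SOURCE B (Python) =====
-- def detectar_padrao5(historico):
--     # The run ending before the terminal "B" reaches the >=3 threshold
--     # exactly when positions -2 and -3 hold the same playable color.
--     if (len(historico) >= 4
--             and historico[-1] == "B"
--             and historico[-2] in ("V", "P")
--             and historico[-3] == historico[-2]):
--         return True, ("P" if historico[-2] == "V" else "V"), "baixo-medio"
--     return False, None, None
-- ===== Notes on version B (the rewrite author's own statement) =====
-- stated objective: simpler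
-- what changed: Replaced the backward run-counting loop with a single conditional over the last three positions (A's loop counts historico[-2] twice, so run>=3 holds exactly when historico[-3]==historico[-2]).
import Mathlib
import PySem

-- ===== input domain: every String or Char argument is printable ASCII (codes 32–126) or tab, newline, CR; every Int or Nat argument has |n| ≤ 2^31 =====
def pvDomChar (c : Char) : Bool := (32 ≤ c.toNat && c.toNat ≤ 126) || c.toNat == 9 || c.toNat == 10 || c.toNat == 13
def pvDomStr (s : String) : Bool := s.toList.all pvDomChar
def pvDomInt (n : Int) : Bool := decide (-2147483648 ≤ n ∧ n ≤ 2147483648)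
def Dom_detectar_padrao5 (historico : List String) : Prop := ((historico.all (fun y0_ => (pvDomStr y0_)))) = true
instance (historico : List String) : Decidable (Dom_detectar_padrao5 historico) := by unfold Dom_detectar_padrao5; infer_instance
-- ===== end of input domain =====

-- B replaces A's backward run-counting loop with one conditional over the last
-- three positions (objective: simpler; A's loop counts historico[-2] twice, so
-- run >= 3 holds exactly when historico[-3] == historico[-2]).

-- ===== PORT A =====
-- the backward loop 'for i in range(len(historico)-2, -1, -1)': fuel = i + 1,
-- breaking (returning run) when the element differs from run_color.
def pvLoopA (h : List String) (c : String) : Nat → Int → Int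
  | 0, run => run
  | n + 1, run =>
      if PySem.List.pyGetD h ((n : Nat) : Int) "" = c then pvLoopA h c n (run + 1) else run

def detectar_padrao5 (historico : List String) : Bool × Option String × Option String :=
  if historico.length < 4 then (false, none, none)
  else if PySem.List.pyGetD historico (-1) "" = "B" then
    if PySem.List.pyGetD historico (-2) "" ≠ "V" ∧ PySem.List.pyGetD historico (-2) "" ≠ "P" then
      (false, none, none)
    else
      let run_color := PySem.List.pyGetD historico (-2) ""
      let run := pvLoopA historico run_color (historico.length - 1) 1
      if 3 ≤ run then
        (true, some (if run_color = "V" then "P" else "V"), some "baixo-medio")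
      else (false, none, none)
  else (false, none, none)

-- ===== PORT B =====
def detectar_padrao5_alt (historico : List String) : Bool × Option String × Option String :=
  if 4 ≤ historico.length ∧ PySem.List.pyGetD historico (-1) "" = "B"
      ∧ (PySem.List.pyGetD historico (-2) "" = "V" ∨ PySem.List.pyGetD historico (-2) "" = "P")
      ∧ PySem.List.pyGetD historico (-3) "" = PySem.List.pyGetD historico (-2) "" then
    (true, some (if PySem.List.pyGetD historico (-2) "" = "V" then "P" else "V"), some "baixo-medio")
  else (false, none, none)

-- ===== PRECONDITION & SPEC =====
def Spec_detectar_padrao5 (historico : List String) (out : Bool × Option String × Option String) : Prop := out = detectar_padrao5_alt historico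
instance (historico : List String) (out : Bool × Option String × Option String) : Decidable (Spec_detectar_padrao5 historico out) := by unfold Spec_detectar_padrao5; infer_instance

-- ===== CLAIM (what is proved, stated in full; the proofs are below) =====
def Claim_equal_detectar_padrao5 : Prop := ∀ (historico : List String), Dom_detectar_padrao5 historico → Spec_detectar_padrao5 historico (detectar_padrao5 historico)

-- ===== LEMMAS AND PROOFS =====

-- continuing the loop never decreases the accumulated run
theorem pvLoopA_ge (h : List String) (c : String) :
    ∀ (n : Nat) (run : Int), run ≤ pvLoopA h c n run := by
  intro n
  induction n with
  | zero => intro run; simp [pvLoopA]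
  | succ m ih =>
      intro run
      simp only [pvLoopA]
      split
      · exact le_trans (by omega) (ih (run + 1))
      · exact le_refl run

-- ===== VERDICT (by name: the statement is the Claim_ definition above) =====
theorem detectar_padrao5_spec : Claim_equal_detectar_padrao5 := by
  intro h _
  unfold Spec_detectar_padrao5 detectar_padrao5 detectar_padrao5_alt
  by_cases hlen : h.length < 4
  · simp [hlen, show ¬ (4 ≤ h.length) from by omega]
  · push_neg at hlen
    simp only [if_neg (by omega : ¬ h.length < 4)]
    by_cases hB : PySem.List.pyGetD h (-1) "" = "B"
    · simp only [if_pos hB]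
      by_cases hVP : PySem.List.pyGetD h (-2) "" = "V" ∨ PySem.List.pyGetD h (-2) "" = "P"
      · have hnot : ¬ (PySem.List.pyGetD h (-2) "" ≠ "V" ∧ PySem.List.pyGetD h (-2) "" ≠ "P") := by
          tauto
        simp only [if_neg hnot]
        -- names for the last three elements
        have h2 : PySem.List.pyGetD h (-2) "" = h[h.length - 2]'(by omega) := by
          rw [PySem.List.pyGetD_neg_ofNat h 2 "" (by omega) (by omega)]
        have h3 : PySem.List.pyGetD h (-3) "" = h[h.length - 3]'(by omega) := by
          rw [PySem.List.pyGetD_neg_ofNat h 3 "" (by omega) (by omega)]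
        -- unfold the loop twice: first step always matches run_color
        have e1 : h.length - 1 = (h.length - 2) + 1 := by omega
        have e2 : h.length - 2 = (h.length - 3) + 1 := by omega
        have g2 : PySem.List.pyGetD h ((h.length - 2 : Nat) : Int) "" = h[h.length - 2]'(by omega) := by
          rw [PySem.List.pyGetD_natCast]; exact List.getD_eq_getElem _ _ (by omega)
        have g3 : PySem.List.pyGetD h ((h.length - 3 : Nat) : Int) "" = h[h.length - 3]'(by omega) := by
          rw [PySem.List.pyGetD_natCast]; exact List.getD_eq_getElem _ _ (by omega)
        have step1 :
            pvLoopA h (PySem.List.pyGetD h (-2) "") (h.length - 1) 1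
              = pvLoopA h (PySem.List.pyGetD h (-2) "") (h.length - 2) 2 := by
          rw [e1]
          simp only [pvLoopA]
          rw [if_pos (by rw [g2, h2])]; norm_num
        by_cases h32 : PySem.List.pyGetD h (-3) "" = PySem.List.pyGetD h (-2) "" 
        · -- third element matches: run reaches 3 (and never decreases)
          have step2 :
              pvLoopA h (PySem.List.pyGetD h (-2) "") (h.length - 2) 2
                = pvLoopA h (PySem.List.pyGetD h (-2) "") (h.length - 3) 3 := by
            rw [e2]
            simp only [pvLoopA]
            rw [if_pos (by rw [g3, ← h3, h32])]; norm_num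
          have hge : (3 : Int) ≤ pvLoopA h (PySem.List.pyGetD h (-2) "") (h.length - 1) 1 := by
            rw [step1, step2]; exact pvLoopA_ge h _ _ 3
          simp only [if_pos hge, if_pos (⟨hlen, hB, hVP, h32⟩ :
            4 ≤ h.length ∧ PySem.List.pyGetD h (-1) "" = "B"
              ∧ (PySem.List.pyGetD h (-2) "" = "V" ∨ PySem.List.pyGetD h (-2) "" = "P")
              ∧ PySem.List.pyGetD h (-3) "" = PySem.List.pyGetD h (-2) "")]
        · -- third element differs: the loop breaks with run = 2
          have step2 :
              pvLoopA h (PySem.List.pyGetD h (-2) "") (h.length - 2) 2 = 2 := by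
            rw [e2]
            simp only [pvLoopA]
            rw [if_neg (by rw [g3, ← h3]; exact h32)]
          have hlt : ¬ (3 : Int) ≤ pvLoopA h (PySem.List.pyGetD h (-2) "") (h.length - 1) 1 := by
            rw [step1, step2]; omega
          simp only [if_neg hlt,
            if_neg (by intro ⟨_, _, _, hc⟩; exact h32 hc :
              ¬ (4 ≤ h.length ∧ PySem.List.pyGetD h (-1) "" = "B"
                ∧ (PySem.List.pyGetD h (-2) "" = "V" ∨ PySem.List.pyGetD h (-2) "" = "P")
                ∧ PySem.List.pyGetD h (-3) "" = PySem.List.pyGetD h (-2) ""))]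
      · simp only [if_pos (by tauto : PySem.List.pyGetD h (-2) "" ≠ "V" ∧ PySem.List.pyGetD h (-2) "" ≠ "P")]
        rw [if_neg (by tauto)]
    · simp only [if_neg hB]
      rw [if_neg (by tauto)]
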